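-- pv_equiv track=rewrite | github.com/shahtr4sh/FakeNewsSimulation | analysis.py | analyze_context_juiciness
-- ===== SOURCE A (Python) =====
-- def analyze_context_juiciness(context):
--     """Analyze the juiciness of the fake news context."""
--     very_high = [
--         "virus", "covid", "authorities silent", "for sale", "emergency", "block access",
--         "identity theft", "sabotage", "privacy violated"
--     ]
--     high = [
--         "hacked", "hack", "leaked", "leak", "scandal", "urgent", "phishing", "compromised",
--         "password reset", "plagiarism", "fake exam", "panic", "malware", "fraud", "scam",
--         "stolen", "for sale", "dark web", "delayed", "failure to comply"
--     ]
--     med_high = [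
--         "vpn update", "proxy", "dissatisfaction", "distrust", "sabotage", "privacy",
--         "protest", "mass sharing", "grant", "scholarship", "register now", "financial aid"
--     ]
--     medium = [
--         "warning", "breach", "incident", "risk", "threat", "phishing", "data", "security",
--         "fake", "rumor", "monitored", "encrypted", "browser", "campus wifi",
--         "ai surveillance", "ethical", "concerns"
--     ]
--     low = [
--         "update", "news", "report", "statement", "info", "information", "timetable", "verify"
--     ]
--
--     context = context.lower()
--     score = 20  # default
--
--     if any(word in context for word in very_high):
--         return 98
--     if any(word in context for word in high):
--         return 90
--     if any(word in context for word in med_high):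
--         return 75
--     if any(word in context for word in medium):
--         return 60
--     if any(word in context for word in low):
--         return 30
--     return score
-- ===== SOURCE B (Python) =====
-- _TIERS = [
--     (98, "virus|covid|authorities silent|for sale|emergency|block access|identity theft|sabotage|privacy violated"),
--     (90, "hacked|hack|leaked|leak|scandal|urgent|phishing|compromised|password reset|plagiarism|fake exam|panic|malware|fraud|scam|stolen|for sale|dark web|delayed|failure to comply"),
--     (75, "vpn update|proxy|dissatisfaction|distrust|sabotage|privacy|protest|mass sharing|grant|scholarship|register now|financial aid"),
--     (60, "warning|breach|incident|risk|threat|phishing|data|security|fake|rumor|monitored|encrypted|browser|campus wifi|ai surveillance|ethical|concerns"),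
--     (30, "update|news|report|statement|info|information|timetable|verify"),
-- ]
--
--
-- def analyze_context_juiciness(context):
--     """Analyze the juiciness of the fake news context."""
--     c = context.lower()
--     return max((s for s, words in _TIERS for w in words.split("|") if w in c),
--                default=20)
-- ===== Notes on version B (the rewrite author's own statement) =====
-- stated objective: alternative
-- what changed: Replaces the five ordered any()-scans and early returns by a declarative score/keyword-string table (keywords pipe-joined per tier, split at use) and a single max over the scores of all matching keywords with default 20; equivalent because tier scores decrease with priority.
import Mathlib
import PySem

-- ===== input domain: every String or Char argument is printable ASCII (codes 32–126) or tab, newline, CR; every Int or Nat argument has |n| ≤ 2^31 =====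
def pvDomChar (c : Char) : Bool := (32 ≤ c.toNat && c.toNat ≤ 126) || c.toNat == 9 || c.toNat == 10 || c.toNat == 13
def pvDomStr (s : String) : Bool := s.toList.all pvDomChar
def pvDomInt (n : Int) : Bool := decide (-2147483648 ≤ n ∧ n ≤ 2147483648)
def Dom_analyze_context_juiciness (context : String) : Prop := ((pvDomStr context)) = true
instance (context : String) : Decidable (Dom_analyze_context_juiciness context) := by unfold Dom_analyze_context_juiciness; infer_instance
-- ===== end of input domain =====

-- B replaces A's five ordered any()-scans with early returns by one declarative score/keyword
-- table (keywords pipe-joined per tier, split at use) and a single max over the scores of all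
-- matching keywords (default 20); equivalent because tier scores decrease with priority.
-- Objective: alternative decomposition, same asymptotic cost.

-- ===== PORT A =====
def pvVeryHigh : List String :=
  ["virus", "covid", "authorities silent", "for sale", "emergency", "block access",
   "identity theft", "sabotage", "privacy violated"]
def pvHigh : List String :=
  ["hacked", "hack", "leaked", "leak", "scandal", "urgent", "phishing", "compromised",
   "password reset", "plagiarism", "fake exam", "panic", "malware", "fraud", "scam",
   "stolen", "for sale", "dark web", "delayed", "failure to comply"]
def pvMedHigh : List String :=
  ["vpn update", "proxy", "dissatisfaction", "distrust", "sabotage", "privacy",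
   "protest", "mass sharing", "grant", "scholarship", "register now", "financial aid"]
def pvMedium : List String :=
  ["warning", "breach", "incident", "risk", "threat", "phishing", "data", "security",
   "fake", "rumor", "monitored", "encrypted", "browser", "campus wifi",
   "ai surveillance", "ethical", "concerns"]
def pvLow : List String :=
  ["update", "news", "report", "statement", "info", "information", "timetable", "verify"]

def analyze_context_juiciness (context : String) : Int :=
  let c := PySem.Str.lower context
  let score : Int := 20
  if pvVeryHigh.any (fun w => PySem.Str.isIn w c) then 98
  else if pvHigh.any (fun w => PySem.Str.isIn w c) then 90
  else if pvMedHigh.any (fun w => PySem.Str.isIn w c) then 75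
  else if pvMedium.any (fun w => PySem.Str.isIn w c) then 60
  else if pvLow.any (fun w => PySem.Str.isIn w c) then 30
  else score

-- ===== PORT B =====
def pvTiersB : List (Int × String) :=
  [(98, "virus|covid|authorities silent|for sale|emergency|block access|identity theft|sabotage|privacy violated"),
   (90, "hacked|hack|leaked|leak|scandal|urgent|phishing|compromised|password reset|plagiarism|fake exam|panic|malware|fraud|scam|stolen|for sale|dark web|delayed|failure to comply"),
   (75, "vpn update|proxy|dissatisfaction|distrust|sabotage|privacy|protest|mass sharing|grant|scholarship|register now|financial aid"),
   (60, "warning|breach|incident|risk|threat|phishing|data|security|fake|rumor|monitored|encrypted|browser|campus wifi|ai surveillance|ethical|concerns"),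
   (30, "update|news|report|statement|info|information|timetable|verify")]

def analyze_context_juiciness_alt (context : String) : Int :=
  let c := PySem.Str.lower context
  PySem.List.maxD
    (pvTiersB.flatMap (fun t =>
      ((((PySem.Str.split? t.2 "|").getD [])).filter (fun w => PySem.Str.isIn w c)).map (fun _ => t.1)))
    (fun s => s) 20

-- ===== PRECONDITION & SPEC =====
def Spec_analyze_context_juiciness (context : String) (out : Int) : Prop := out = analyze_context_juiciness_alt context
instance (context : String) (out : Int) : Decidable (Spec_analyze_context_juiciness context out) := by unfold Spec_analyze_context_juiciness; infer_instance

-- ===== CLAIM (what is proved, stated in full; the proofs are below) =====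
def Claim_equal_analyze_context_juiciness : Prop := ∀ (context : String), Dom_analyze_context_juiciness context → Spec_analyze_context_juiciness context (analyze_context_juiciness context)

-- ===== LEMMAS AND PROOFS =====

-- the (score, keyword) pairs B's table denotes, written out (proved below)
def pvP : List (Int × String) :=
  [(98, "virus"), (98, "covid"), (98, "authorities silent"), (98, "for sale"), (98, "emergency"),
   (98, "block access"), (98, "identity theft"), (98, "sabotage"), (98, "privacy violated"),
   (90, "hacked"), (90, "hack"), (90, "leaked"), (90, "leak"), (90, "scandal"), (90, "urgent"),
   (90, "phishing"), (90, "compromised"), (90, "password reset"), (90, "plagiarism"),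
   (90, "fake exam"), (90, "panic"), (90, "malware"), (90, "fraud"), (90, "scam"), (90, "stolen"),
   (90, "for sale"), (90, "dark web"), (90, "delayed"), (90, "failure to comply"),
   (75, "vpn update"), (75, "proxy"), (75, "dissatisfaction"), (75, "distrust"), (75, "sabotage"),
   (75, "privacy"), (75, "protest"), (75, "mass sharing"), (75, "grant"), (75, "scholarship"),
   (75, "register now"), (75, "financial aid"),
   (60, "warning"), (60, "breach"), (60, "incident"), (60, "risk"), (60, "threat"),
   (60, "phishing"), (60, "data"), (60, "security"), (60, "fake"), (60, "rumor"),
   (60, "monitored"), (60, "encrypted"), (60, "browser"), (60, "campus wifi"),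
   (60, "ai surveillance"), (60, "ethical"), (60, "concerns"),
   (30, "update"), (30, "news"), (30, "report"), (30, "statement"), (30, "info"),
   (30, "information"), (30, "timetable"), (30, "verify")]

set_option maxRecDepth 16384 in
lemma pv_flat_eq :
    pvTiersB.flatMap (fun t => (((PySem.Str.split? t.2 "|").getD [])).map (fun w => (t.1, w))) = pvP := by
  decide

lemma pv_filter_pairs (c : String) :
    pvTiersB.flatMap (fun t =>
      ((((PySem.Str.split? t.2 "|").getD [])).filter (fun w => PySem.Str.isIn w c)).map (fun _ => t.1))
    = ((pvP.filter (fun p => PySem.Str.isIn p.2 c)).map (fun p => p.1)) := by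
  rw [← pv_flat_eq]
  induction pvTiersB with
  | nil => rfl
  | cons t ts ih =>
    simp only [List.flatMap_cons, List.filter_append, List.map_append, ih]
    congr 1
    rw [List.filter_map, List.map_map]
    rfl

-- combinatorial facts about the table vs the tier lists
lemma pv_le98 : ∀ p ∈ pvP, p.1 ≤ 98 := by decide
lemma pv_k98 : ∀ p ∈ pvP, 90 < p.1 → p.2 ∈ pvVeryHigh := by decide
lemma pv_k90 : ∀ p ∈ pvP, 75 < p.1 → p.2 ∈ pvVeryHigh ∨ p.2 ∈ pvHigh := by decide
lemma pv_k75 : ∀ p ∈ pvP, 60 < p.1 → p.2 ∈ pvVeryHigh ∨ p.2 ∈ pvHigh ∨ p.2 ∈ pvMedHigh := by decide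
lemma pv_k60 : ∀ p ∈ pvP, 30 < p.1 → p.2 ∈ pvVeryHigh ∨ p.2 ∈ pvHigh ∨ p.2 ∈ pvMedHigh ∨ p.2 ∈ pvMedium := by decide
lemma pv_k30 : ∀ p ∈ pvP, p.2 ∈ pvVeryHigh ∨ p.2 ∈ pvHigh ∨ p.2 ∈ pvMedHigh ∨ p.2 ∈ pvMedium ∨ p.2 ∈ pvLow := by decide
lemma pv_d98 : ∀ w ∈ pvVeryHigh, ((98 : Int), w) ∈ pvP := by decide
lemma pv_d90 : ∀ w ∈ pvHigh, ((90 : Int), w) ∈ pvP := by decide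
lemma pv_d75 : ∀ w ∈ pvMedHigh, ((75 : Int), w) ∈ pvP := by decide
lemma pv_d60 : ∀ w ∈ pvMedium, ((60 : Int), w) ∈ pvP := by decide
lemma pv_d30 : ∀ w ∈ pvLow, ((30 : Int), w) ∈ pvP := by decide

-- bounds for Python's max(…, default=d)
lemma pv_maxD_le (l : List Int) (d b : Int) (hd : d ≤ b) (h : ∀ x ∈ l, x ≤ b) :
    PySem.List.maxD l (fun s => s) d ≤ b := by
  unfold PySem.List.maxD
  cases hm : PySem.List.max? l (fun s => s) with
  | none => simpa using hd
  | some m => simpa using h m (PySem.List.max?_mem hm)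

lemma pv_le_maxD (l : List Int) (d v : Int) (hv : v ∈ l) :
    v ≤ PySem.List.maxD l (fun s => s) d := by
  unfold PySem.List.maxD
  cases hm : PySem.List.max? l (fun s => s) with
  | none =>
    rw [PySem.List.max?_eq_none_iff] at hm
    simp [hm] at hv
  | some m => simpa using PySem.List.max?_isMax hm v hv

-- B's max over the matching table entries equals v when every matching entry scores ≤ v
-- and some matching entry scores exactly v
lemma pv_tier (c : String) (v : Int) (hv : 20 ≤ v)
    (hub : ∀ p ∈ pvP, PySem.Str.isIn p.2 c = true → p.1 ≤ v)
    (w : String) (hw : (v, w) ∈ pvP) (hwc : PySem.Str.isIn w c = true) :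
    PySem.List.maxD ((pvP.filter (fun p => PySem.Str.isIn p.2 c)).map (fun p => p.1))
      (fun s => s) 20 = v := by
  apply le_antisymm
  · apply pv_maxD_le _ _ _ hv
    intro x hx
    simp only [List.mem_map, List.mem_filter] at hx
    obtain ⟨p, ⟨hp, hpc⟩, rfl⟩ := hx
    exact hub p hp hpc
  · apply pv_le_maxD
    simp only [List.mem_map, List.mem_filter]
    exact ⟨(v, w), ⟨hw, hwc⟩, rfl⟩

lemma pv_default (c : String)
    (h : ∀ p ∈ pvP, ¬ PySem.Str.isIn p.2 c = true) :
    PySem.List.maxD ((pvP.filter (fun p => PySem.Str.isIn p.2 c)).map (fun p => p.1))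
      (fun s => s) 20 = 20 := by
  have hnil : pvP.filter (fun p => PySem.Str.isIn p.2 c) = [] := by
    rw [List.filter_eq_nil_iff]
    intro p hp
    simpa using h p hp
  rw [hnil]
  rfl

-- ===== VERDICT (by name: the statement is the Claim_ definition above) =====
theorem analyze_context_juiciness_spec : Claim_equal_analyze_context_juiciness := by
  intro context _
  unfold Spec_analyze_context_juiciness
  simp only [analyze_context_juiciness, analyze_context_juiciness_alt, pv_filter_pairs]
  set c := PySem.Str.lower context with hc
  by_cases h1 : pvVeryHigh.any (fun w => PySem.Str.isIn w c) = true
  · rw [if_pos h1]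
    obtain ⟨w, hw, hwc⟩ := List.any_eq_true.mp h1
    exact (pv_tier c 98 (by norm_num) (fun p hp _ => pv_le98 p hp) w (pv_d98 w hw) hwc).symm
  · have h1' : ∀ w ∈ pvVeryHigh, ¬ PySem.Str.isIn w c = true := by
      simpa [List.any_eq_true] using h1
    rw [if_neg h1]
    by_cases h2 : pvHigh.any (fun w => PySem.Str.isIn w c) = true
    · rw [if_pos h2]
      obtain ⟨w, hw, hwc⟩ := List.any_eq_true.mp h2
      have hub : ∀ p ∈ pvP, PySem.Str.isIn p.2 c = true → p.1 ≤ 90 := by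
        intro p hp hpc
        by_contra hgt
        exact h1' p.2 (pv_k98 p hp (by omega)) hpc
      exact (pv_tier c 90 (by norm_num) hub w (pv_d90 w hw) hwc).symm
    · have h2' : ∀ w ∈ pvHigh, ¬ PySem.Str.isIn w c = true := by
        simpa [List.any_eq_true] using h2
      rw [if_neg h2]
      by_cases h3 : pvMedHigh.any (fun w => PySem.Str.isIn w c) = true
      · rw [if_pos h3]
        obtain ⟨w, hw, hwc⟩ := List.any_eq_true.mp h3
        have hub : ∀ p ∈ pvP, PySem.Str.isIn p.2 c = true → p.1 ≤ 75 := by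
          intro p hp hpc
          by_contra hgt
          rcases pv_k90 p hp (by omega) with h | h
          · exact h1' p.2 h hpc
          · exact h2' p.2 h hpc
        exact (pv_tier c 75 (by norm_num) hub w (pv_d75 w hw) hwc).symm
      · have h3' : ∀ w ∈ pvMedHigh, ¬ PySem.Str.isIn w c = true := by
          simpa [List.any_eq_true] using h3
        rw [if_neg h3]
        by_cases h4 : pvMedium.any (fun w => PySem.Str.isIn w c) = true
        · rw [if_pos h4]
          obtain ⟨w, hw, hwc⟩ := List.any_eq_true.mp h4
          have hub : ∀ p ∈ pvP, PySem.Str.isIn p.2 c = true → p.1 ≤ 60 := by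
            intro p hp hpc
            by_contra hgt
            rcases pv_k75 p hp (by omega) with h | h | h
            · exact h1' p.2 h hpc
            · exact h2' p.2 h hpc
            · exact h3' p.2 h hpc
          exact (pv_tier c 60 (by norm_num) hub w (pv_d60 w hw) hwc).symm
        · have h4' : ∀ w ∈ pvMedium, ¬ PySem.Str.isIn w c = true := by
            simpa [List.any_eq_true] using h4
          rw [if_neg h4]
          by_cases h5 : pvLow.any (fun w => PySem.Str.isIn w c) = true
          · rw [if_pos h5]
            obtain ⟨w, hw, hwc⟩ := List.any_eq_true.mp h5
            have hub : ∀ p ∈ pvP, PySem.Str.isIn p.2 c = true → p.1 ≤ 30 := by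
              intro p hp hpc
              by_contra hgt
              rcases pv_k60 p hp (by omega) with h | h | h | h
              · exact h1' p.2 h hpc
              · exact h2' p.2 h hpc
              · exact h3' p.2 h hpc
              · exact h4' p.2 h hpc
            exact (pv_tier c 30 (by norm_num) hub w (pv_d30 w hw) hwc).symm
          · have h5' : ∀ w ∈ pvLow, ¬ PySem.Str.isIn w c = true := by
              simpa [List.any_eq_true] using h5
            rw [if_neg h5]
            have h : ∀ p ∈ pvP, ¬ PySem.Str.isIn p.2 c = true := by
              intro p hp
              rcases pv_k30 p hp with h | h | h | h | h
              · exact h1' p.2 h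
              · exact h2' p.2 h
              · exact h3' p.2 h
              · exact h4' p.2 h
              · exact h5' p.2 h
            exact (pv_default c h).symm
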